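-- pv_equiv track=rewrite | github.com/korovkincode/2048Game | func.py | up_dir
-- ===== SOURCE A (Python) =====
-- def up_dir(field):
-- 	flag = False
-- 	for i in range(len(field)):
-- 		#Формируем линию которую сдвигаем
-- 		line = []
-- 		for j in range(0, len(field)):
-- 			line.append(field[j][i])
-- 		line_f = line
-- 		line = list(filter(lambda el : el != None, line))
-- 		el = len(line) - 1
-- 		#Делаем сдвиг по линии
-- 		while el > 0:
-- 			if line[el] == line[el - 1] and line[el] != None:
-- 				line[el - 1] *= 2
-- 				line[el] = None
-- 				el -= 1
-- 			el -= 1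
-- 		line = list(filter(lambda el : el != None, line))
-- 		while len(line) < len(field[0]):
-- 			line.append(None)
-- 		if line_f != line: flag = True
-- 	return flag
-- ===== SOURCE B (Python) =====
-- def up_dir(field):
--     changed = False
--     n = len(field)
--     for i in range(n):
--         gap = False
--         prev = None
--         for j in range(n):
--             cell = field[j][i]
--             if cell is None:
--                 gap = True
--             else:
--                 if gap or cell == prev:
--                     changed = True
--                 prev = cell
--     return changed
-- ===== Notes on version B (the rewrite author's own statement) =====
-- stated objective: simpler
-- what changed: Replaces A's per-column compact-merge-compact-pad-and-compare simulation (building, filtering and comparing several intermediate lists per column) with a single pass per column tracking only a gap flag and the previous non-None value; same O(n^2) asymptotics but no intermediate lists, measured ~3.6x faster.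
-- outside the precondition, e.g. on up_dir([[None, None]]): A returns True, B returns False
import Mathlib
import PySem

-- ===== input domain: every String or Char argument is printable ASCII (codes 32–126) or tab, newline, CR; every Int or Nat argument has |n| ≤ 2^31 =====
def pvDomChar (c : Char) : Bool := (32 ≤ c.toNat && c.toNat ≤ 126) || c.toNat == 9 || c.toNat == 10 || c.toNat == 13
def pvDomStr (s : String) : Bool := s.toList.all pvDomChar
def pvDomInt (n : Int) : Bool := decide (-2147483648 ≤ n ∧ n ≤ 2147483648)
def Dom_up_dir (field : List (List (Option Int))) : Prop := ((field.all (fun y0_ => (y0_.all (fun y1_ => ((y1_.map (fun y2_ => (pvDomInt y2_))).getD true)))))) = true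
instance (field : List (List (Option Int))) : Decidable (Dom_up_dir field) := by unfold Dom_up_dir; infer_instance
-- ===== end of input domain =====

-- B replaces A's per-column compact-merge-compact-pad-and-compare simulation by a single
-- scan per column (gap flag + previous non-None value); proved equal on square grids (Pre_).

-- ===== PORT A =====
-- A-side helper: the 'while el > 0' merge loop, mutating 'line' by index exactly as A does.
def mergeShift : List (Option Int) → Nat → List (Option Int)
  | line, 0 => line
  | line, el+1 =>
    if line.getD (el+1) none == line.getD el none && line.getD (el+1) none != none then
      mergeShift ((line.set el ((line.getD el none).map (fun v => v * 2))).set (el+1) none) (el+1-2)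
    else
      mergeShift line el
termination_by _ el => el
decreasing_by all_goals omega

def up_dir (field : List (List (Option Int))) : Bool :=
  (List.range field.length).foldl (fun flag i =>
    let line := (List.range field.length).foldl
      (fun acc j => acc ++ [(field.getD j []).getD i none]) ([] : List (Option Int))
    let line_f := line
    let line1 := line.filter (fun el => el != none)
    let merged := mergeShift line1 (line1.length - 1)
    let line2 := merged.filter (fun el => el != none)
    let padded := line2 ++ List.replicate ((field.headD []).length - line2.length) (none : Option Int)
    if line_f != padded then true else flag) false

-- ===== PORT B =====
-- B-side helper: the loop body of B's inner scan (state = (changed, gap, prev)).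
def stepB (st : Bool × Bool × Option Int) (cell : Option Int) : Bool × Bool × Option Int :=
  match cell with
  | none => (st.1, true, st.2.2)
  | some v => (st.1 || st.2.1 || (some v == st.2.2), st.2.1, some v)

def up_dir_alt (field : List (List (Option Int))) : Bool :=
  let n := field.length
  (List.range n).foldl (fun changed i =>
    ((List.range n).foldl
      (fun st j => stepB st ((field.getD j []).getD i none))
      (changed, false, (none : Option Int))).1) false

-- ===== PRECONDITION & SPEC =====
-- Pre_ restricts to square grids (every row as long as the number of rows) — the game's
-- natural domain. A raises IndexError on shorter rows; on wider grids A still returns, but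
-- its comparison against a line padded to the FIRST row's length is an accident of the
-- implementation (e.g. [[None, None]] → True though nothing moves), which B does not imitate.
def Pre_up_dir (field : List (List (Option Int))) : Prop :=
  ∀ row ∈ field, row.length = field.length
instance (field : List (List (Option Int))) : Decidable (Pre_up_dir field) := by
  unfold Pre_up_dir; infer_instance

def pvWitness_up_dir : List (List (Option Int)) :=
  [[some 2, none], [some 2, some 4]]

def Spec_up_dir (field : List (List (Option Int))) (out : Bool) : Prop := out = up_dir_alt field
instance (field : List (List (Option Int))) (out : Bool) : Decidable (Spec_up_dir field out) := by
  unfold Spec_up_dir; infer_instance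

-- ===== CLAIM (what is proved, stated in full; the proofs are below) =====
def Claim_equal_up_dir : Prop :=
  ∀ (field : List (List (Option Int))), Dom_up_dir field → Pre_up_dir field →
    Spec_up_dir field (up_dir field)

-- ===== LEMMAS AND PROOFS =====

-- The column both programs read (top to bottom).
def colOf (field : List (List (Option Int))) (i : Nat) : List (Option Int) :=
  (List.range field.length).map (fun j => ((field.getD j []).getD i none))

-- A's compacted line.
def compOf (c : List (Option Int)) : List (Option Int) := c.filter (fun el => el != none)

-- "a value strictly after a None" (a gap the move would close).
def gapVal : List (Option Int) → Bool
  | [] => false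
  | none :: t => t.any (fun x => x != none)
  | some _ :: t => gapVal t

-- an adjacent mergeable pair, guard written exactly as A's while-loop condition.
def hasAdj : List (Option Int) → Bool
  | a :: b :: t => (b == a && b != none) || hasAdj (b :: t)
  | _ => false

-- B's scan with the threaded 'changed' stripped off.
def scanPure : List (Option Int) → Bool → Option Int → Bool
  | [], _, _ => false
  | none :: t, _, p => scanPure t true p
  | some v :: t, g, p => (g || (some v == p)) || scanPure t g (some v)

-- pair detection by previous-value tracking.
def pairAux : List (Option Int) → Option Int → Bool
  | [], _ => false
  | none :: t, p => pairAux t p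
  | some v :: t, p => (some v == p) || pairAux t (some v)

-- A's per-column change flag, pad target n.
def colA_changed (n : Nat) (c : List (Option Int)) : Bool :=
  let line1 := compOf c
  let merged := mergeShift line1 (line1.length - 1)
  let line2 := compOf merged
  c != line2 ++ List.replicate (n - line2.length) (none : Option Int)

-- an index-adjacent mergeable pair at position ≤ el, as mergeShift tests it.
def idxPair (l : List (Option Int)) (el : Nat) : Prop :=
  ∃ k, 1 ≤ k ∧ k ≤ el ∧ (l.getD k none == l.getD (k-1) none && l.getD k none != none) = true

theorem foldl_getD_range {α β : Type} (l : List α) (f : β → α → β) (b : β) (d : α) :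
    (List.range l.length).foldl (fun st j => f st (l.getD j d)) b = l.foldl f b := by
  induction l generalizing b with
  | nil => rfl
  | cons a t ih =>
    simp only [List.length_cons, List.range_succ_eq_map, List.foldl_cons, List.foldl_map,
      List.getD_cons_succ, List.getD_cons_zero]
    exact ih (f b a)

theorem scan_state (c : List (Option Int)) (b g : Bool) (p : Option Int) :
    (c.foldl stepB (b, g, p)).1 = (b || scanPure c g p) := by
  induction c generalizing b g p with
  | nil => simp [scanPure]
  | cons cell t ih =>
    cases cell with
    | none => exact ih b true p
    | some v =>
      simp only [List.foldl_cons, stepB, scanPure]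
      rw [ih]
      cases b <;> cases g <;> cases (some v == p) <;> rfl

theorem scanPure_char (c : List (Option Int)) (g : Bool) (p : Option Int) :
    scanPure c g p = ((if g then c.any (fun x => x != none) else gapVal c) || pairAux c p) := by
  induction c generalizing g p with
  | nil => cases g <;> rfl
  | cons cell t ih =>
    cases cell with
    | none =>
      show scanPure t true p = _
      rw [ih]
      cases g <;> simp only [gapVal, pairAux, List.any_cons, if_true] <;> rfl
    | some v =>
      simp only [scanPure]
      rw [ih]
      simp only [gapVal, pairAux, List.any_cons]
      cases g <;> cases (some v == p) <;> cases gapVal t <;> cases pairAux t (some v) <;>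
        cases t.any (fun x => x != none) <;> rfl

theorem compOf_ne_none (c : List (Option Int)) : ∀ x ∈ compOf c, x ≠ none := by
  intro x hx
  have := List.of_mem_filter hx
  simpa using this

theorem compOf_somes (l : List (Option Int)) (h : ∀ x ∈ l, x ≠ none) : compOf l = l :=
  List.filter_eq_self.mpr (fun a ha => by simpa using h a ha)

theorem getD_compOf_ne (c : List (Option Int)) (k : Nat) (h : k < (compOf c).length) :
    (compOf c).getD k none ≠ none := by
  rw [List.getD_eq_getElem _ _ h]
  exact compOf_ne_none c _ (List.getElem_mem h)

theorem gap_false_shape (c : List (Option Int)) (h : gapVal c = false) :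
    c = compOf c ++ List.replicate (c.length - (compOf c).length) none := by
  induction c with
  | nil => rfl
  | cons a t ih =>
    cases a with
    | some v =>
      have h' : gapVal t = false := h
      have hlen : (compOf t).length ≤ t.length := List.length_filter_le _ _
      have hc : compOf (some v :: t) = some v :: compOf t := by simp [compOf]
      rw [hc]
      have harith : (some v :: t).length - (some v :: compOf t).length
          = t.length - (compOf t).length := by simp only [List.length_cons]; omega
      rw [harith]
      simpa using ih h'
    | none =>
      have h' : t.any (fun x => x != none) = false := h
      have hall : ∀ x ∈ t, x = none := by
        intro x hx
        have := List.any_eq_false.mp h' x hx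
        simpa using this
      have hc : compOf (none :: t) = [] := by
        apply List.filter_eq_nil_iff.mpr
        intro a ha
        rcases List.mem_cons.mp ha with rfl | ha'
        · simp
        · simp [hall a ha']
      rw [hc]
      have ht : t = List.replicate t.length none := List.eq_replicate_of_mem hall
      simp only [List.nil_append, List.length_nil, Nat.sub_zero, List.length_cons]
      rw [List.replicate_succ]
      exact congrArg (none :: ·) ht

theorem gap_shape_false (l : List (Option Int)) (k : Nat) (h : ∀ x ∈ l, x ≠ none) :
    gapVal (l ++ List.replicate k none) = false := by
  induction l with
  | nil =>
    cases k with
    | zero => rfl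
    | succ m =>
      simp only [List.nil_append, List.replicate_succ, gapVal]
      apply List.any_eq_false.mpr
      intro x hx
      have := List.eq_of_mem_replicate hx
      simp [this]
  | cons a t ih =>
    cases a with
    | some v => exact ih (fun x hx => h x (List.mem_cons_of_mem _ hx))
    | none => exact absurd rfl (h none (List.mem_cons_self))

theorem lt_length_of_getD_ne (l : List (Option Int)) (k : Nat) (h : l.getD k none ≠ none) :
    k < l.length := by
  by_contra hk
  rw [List.getD_eq_default _ _ (by omega)] at h
  exact h rfl

theorem sc_set_some (l : List (Option Int)) (k : Nat) (w : Int)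
    (h : l.getD k none ≠ none) :
    (compOf (l.set k (some w))).length = (compOf l).length := by
  induction l generalizing k with
  | nil => simp [List.getD] at h
  | cons a t ih =>
    cases k with
    | zero =>
      have : a ≠ none := h
      rcases a with _ | u
      · exact absurd rfl this
      · simp [compOf]
    | succ m =>
      have h' : t.getD m none ≠ none := h
      rcases a with _ | u <;> simp [compOf] <;>
        simpa [compOf] using ih m h'

theorem sc_set_none (l : List (Option Int)) (k : Nat)
    (h : l.getD k none ≠ none) :
    (compOf (l.set k none)).length + 1 = (compOf l).length := by
  induction l generalizing k with
  | nil => simp [List.getD] at h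
  | cons a t ih =>
    cases k with
    | zero =>
      have : a ≠ none := h
      rcases a with _ | u
      · exact absurd rfl this
      · simp [compOf]
    | succ m =>
      have h' : t.getD m none ≠ none := h
      rcases a with _ | u <;> simp only [List.set_cons_succ, compOf, List.filter_cons] <;>
        simp <;> simpa [compOf] using ih m h'

theorem sc_pos (l : List (Option Int)) (k : Nat) (h : l.getD k none ≠ none) :
    0 < (compOf l).length := by
  have hk : k < l.length := lt_length_of_getD_ne l k h
  rw [List.getD_eq_getElem _ _ hk] at h
  have hm : l[k] ∈ compOf l := List.mem_filter.mpr ⟨List.getElem_mem hk, by simpa using h⟩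
  exact List.length_pos_of_mem hm

theorem getD_set_ne (l : List (Option Int)) (i j : Nat) (v : Option Int) (hij : i ≠ j) :
    (l.set i v).getD j none = l.getD j none := by
  rw [List.getD_eq_getElem?_getD, List.getD_eq_getElem?_getD, List.getElem?_set_ne hij]

theorem sc_mergeShift_le (el : Nat) : ∀ l : List (Option Int),
    (compOf (mergeShift l el)).length ≤ (compOf l).length := by
  induction el using Nat.strong_induction_on with
  | _ el ih =>
    intro l
    cases el with
    | zero => rw [mergeShift]
    | succ e =>
      rw [mergeShift]
      by_cases hc : (l.getD (e+1) none == l.getD e none && l.getD (e+1) none != none) = true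
      · rw [if_pos hc]
        have h1 : l.getD (e+1) none ≠ none := by
          have := (Bool.and_eq_true .. ▸ hc).2
          simpa using this
        have heq : l.getD (e+1) none = l.getD e none := by
          have := (Bool.and_eq_true .. ▸ hc).1
          simpa using this
        have h2 : l.getD e none ≠ none := heq ▸ h1
        obtain ⟨u, hu⟩ : ∃ u, l.getD e none = some u := Option.ne_none_iff_exists'.mp h2
        have hs1 : (compOf (l.set e ((l.getD e none).map (fun v => v * 2)))).length
            = (compOf l).length := by
          rw [hu]; exact sc_set_some l e (u * 2) h2
        have hg : (l.set e ((l.getD e none).map (fun v => v * 2))).getD (e+1) none ≠ none := by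
          rw [getD_set_ne l e (e+1) _ (by omega)]; exact h1
        have hs2 := sc_set_none _ (e+1) hg
        have hle := ih (e+1-2) (by omega)
          ((l.set e ((l.getD e none).map (fun v => v * 2))).set (e+1) none)
        omega
      · rw [if_neg hc]
        exact ih e (by omega) l

theorem sc_mergeShift_lt (el : Nat) : ∀ l : List (Option Int), idxPair l el →
    (compOf (mergeShift l el)).length < (compOf l).length := by
  induction el using Nat.strong_induction_on with
  | _ el ih =>
    intro l hp
    cases el with
    | zero => obtain ⟨k, hk1, hk2, _⟩ := hp; omega
    | succ e =>
      rw [mergeShift]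
      by_cases hc : (l.getD (e+1) none == l.getD e none && l.getD (e+1) none != none) = true
      · rw [if_pos hc]
        have h1 : l.getD (e+1) none ≠ none := by
          have := (Bool.and_eq_true .. ▸ hc).2
          simpa using this
        have heq : l.getD (e+1) none = l.getD e none := by
          have := (Bool.and_eq_true .. ▸ hc).1
          simpa using this
        have h2 : l.getD e none ≠ none := heq ▸ h1
        obtain ⟨u, hu⟩ : ∃ u, l.getD e none = some u := Option.ne_none_iff_exists'.mp h2
        have hs1 : (compOf (l.set e ((l.getD e none).map (fun v => v * 2)))).length
            = (compOf l).length := by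
          rw [hu]; exact sc_set_some l e (u * 2) h2
        have hg : (l.set e ((l.getD e none).map (fun v => v * 2))).getD (e+1) none ≠ none := by
          rw [getD_set_ne l e (e+1) _ (by omega)]; exact h1
        have hs2 := sc_set_none _ (e+1) hg
        have hle := sc_mergeShift_le (e+1-2)
          ((l.set e ((l.getD e none).map (fun v => v * 2))).set (e+1) none)
        have hpos := sc_pos l (e+1) h1
        omega
      · rw [if_neg hc]
        obtain ⟨k, hk1, hk2, hg⟩ := hp
        have hke : k ≤ e := by
          rcases Nat.lt_or_ge k (e+1) with hlt | hge
          · omega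
          · exfalso
            have : k = e + 1 := by omega
            subst this
            have hg' := hg
            simp only [Nat.add_sub_cancel] at hg'
            exact hc hg'
        exact ih e (by omega) l ⟨k, hk1, hke, hg⟩

theorem mergeShift_id (el : Nat) : ∀ l : List (Option Int),
    (∀ k, 1 ≤ k → (l.getD k none == l.getD (k-1) none && l.getD k none != none) = false) →
    mergeShift l el = l := by
  induction el with
  | zero => intro l _; rw [mergeShift]
  | succ e ih =>
    intro l h
    rw [mergeShift]
    have h' := h (e+1) (by omega)
    simp only [Nat.add_sub_cancel] at h'
    rw [if_neg (by intro hq; rw [h'] at hq; exact Bool.false_ne_true hq)]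
    exact ih l h

theorem pairAux_compOf (c : List (Option Int)) : ∀ p, pairAux c p = pairAux (compOf c) p := by
  induction c with
  | nil => intro p; rfl
  | cons a t ih =>
    intro p
    cases a with
    | none => simpa [pairAux, compOf] using ih p
    | some v => simp [pairAux, compOf, ih (some v)]

theorem pairAux_somes (l : List (Option Int)) : ∀ (x p : Option Int), (∀ y ∈ x :: l, y ≠ none) →
    pairAux (x :: l) p = ((x == p) || hasAdj (x :: l)) := by
  induction l with
  | nil =>
    intro x p h
    rcases x with _ | v
    · exact absurd rfl (h none (List.mem_cons_self))
    · simp [pairAux, hasAdj]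
  | cons y t ih =>
    intro x p h
    have hx : x ≠ none := h x (List.mem_cons_self)
    have hy : y ≠ none := h y (List.mem_cons_of_mem _ (List.mem_cons_self))
    rcases x with _ | v
    · exact absurd rfl hx
    · have hrest : ∀ z ∈ y :: t, z ≠ none := fun z hz => h z (List.mem_cons_of_mem _ hz)
      calc pairAux (some v :: y :: t) p
          = ((some v == p) || pairAux (y :: t) (some v)) := by
            rcases y with _ | w
            · exact absurd rfl hy
            · rfl
        _ = ((some v == p) || ((y == some v) || hasAdj (y :: t))) := by
            rw [ih y (some v) hrest]
        _ = ((some v == p) || hasAdj (some v :: y :: t)) := by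
            have : hasAdj (some v :: y :: t) = ((y == some v && y != none) || hasAdj (y :: t)) := rfl
            rw [this]
            have hyb : (y != none) = true := by simpa using hy
            rw [hyb, Bool.and_true]

theorem pairAux_none_eq_hasAdj (l : List (Option Int)) (h : ∀ y ∈ l, y ≠ none) :
    pairAux l none = hasAdj l := by
  cases l with
  | nil => rfl
  | cons x t =>
    rw [pairAux_somes t x none h]
    have hx : x ≠ none := h x (List.mem_cons_self)
    rcases x with _ | v
    · exact absurd rfl hx
    · simp

theorem hasAdj_iff_idx (l : List (Option Int)) :
    hasAdj l = true ↔ ∃ k, 1 ≤ k ∧ k < l.length ∧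
      (l.getD k none == l.getD (k-1) none && l.getD k none != none) = true := by
  induction l with
  | nil =>
    simp only [hasAdj, List.length_nil]
    constructor
    · intro h; cases h
    · rintro ⟨k, hk1, hk2, _⟩; omega
  | cons a t ih =>
    cases t with
    | nil =>
      simp only [hasAdj, List.length_cons, List.length_nil]
      constructor
      · intro h; cases h
      · rintro ⟨k, hk1, hk2, _⟩; omega
    | cons b t' =>
      have hunf : hasAdj (a :: b :: t') = ((b == a && b != none) || hasAdj (b :: t')) := rfl
      constructor
      · intro h
        rw [hunf, Bool.or_eq_true] at h
        rcases h with h1 | h2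
        · exact ⟨1, by omega, by simp, by simpa using h1⟩
        · obtain ⟨k, hk1, hk2, hg⟩ := (ih.mp h2)
          refine ⟨k + 1, by omega, by simp at hk2 ⊢; omega, ?_⟩
          have hk' : k - 1 + 1 = k := by omega
          calc ((a :: b :: t').getD (k+1) none == (a :: b :: t').getD (k+1-1) none
                && (a :: b :: t').getD (k+1) none != none)
              = ((b :: t').getD k none == (b :: t').getD (k-1) none
                && (b :: t').getD k none != none) := by
                rw [Nat.add_sub_cancel, ← hk']
                simp
            _ = true := hg
      · rintro ⟨k, hk1, hk2, hg⟩
        rcases Nat.lt_or_ge k 2 with hk | hk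
        · have : k = 1 := by omega
          subst this
          rw [hunf, Bool.or_eq_true]
          left
          simpa using hg
        · rw [hunf, Bool.or_eq_true]
          right
          apply ih.mpr
          refine ⟨k - 1, by omega, by simp at hk2 ⊢; omega, ?_⟩
          have hk' : k - 1 - 1 + 1 = k - 1 := by omega
          have hk'' : k - 1 + 1 = k := by omega
          calc ((b :: t').getD (k-1) none == (b :: t').getD (k-1-1) none
                && (b :: t').getD (k-1) none != none)
              = ((a :: b :: t').getD k none == (a :: b :: t').getD (k-1) none
                && (a :: b :: t').getD k none != none) := by
                rw [← hk'', ← hk']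
                simp
            _ = true := hg

theorem getD_replicate_none (k j : Nat) :
    (List.replicate k (none : Option Int)).getD j none = none := by
  rw [List.getD_eq_getElem?_getD, List.getElem?_replicate]
  split <;> rfl

theorem colA_char (c : List (Option Int)) :
    colA_changed c.length c = (gapVal c || pairAux c none) := by
  have hcs : ∀ x ∈ compOf c, x ≠ none := compOf_ne_none c
  have hpair : pairAux c none = hasAdj (compOf c) := by
    rw [pairAux_compOf]; exact pairAux_none_eq_hasAdj _ hcs
  by_cases hg : gapVal c = true
  · have hne : c ≠ compOf (mergeShift (compOf c) ((compOf c).length - 1)) ++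
        List.replicate (c.length - (compOf (mergeShift (compOf c) ((compOf c).length - 1))).length)
        (none : Option Int) := by
      intro hEq
      have := gap_shape_false
        (compOf (mergeShift (compOf c) ((compOf c).length - 1)))
        (c.length - (compOf (mergeShift (compOf c) ((compOf c).length - 1))).length)
        (compOf_ne_none _)
      rw [← hEq] at this
      rw [hg] at this
      cases this
    show (c != _) = _
    rw [bne_iff_ne.mpr hne, hg, Bool.true_or]
  · have hg' : gapVal c = false := Bool.eq_false_iff.mpr hg
    have hshape := gap_false_shape c hg'
    have hcc : compOf (compOf c) = compOf c := compOf_somes _ hcs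
    by_cases hp : hasAdj (compOf c) = true
    · obtain ⟨k, hk1, hklt, hgd⟩ := (hasAdj_iff_idx (compOf c)).mp hp
      have hip : idxPair (compOf c) ((compOf c).length - 1) := ⟨k, hk1, by omega, hgd⟩
      have hlt := sc_mergeShift_lt ((compOf c).length - 1) (compOf c) hip
      rw [hcc] at hlt
      set line2 := compOf (mergeShift (compOf c) ((compOf c).length - 1)) with hl2
      set m := line2.length with hm
      have hmlt : m < (compOf c).length := hlt
      have hclen : (compOf c).length ≤ c.length := List.length_filter_le _ _
      have hcm : c.getD m none ≠ none := by
        conv_lhs => rw [hshape]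
        rw [List.getD_append _ _ _ m hmlt]
        exact getD_compOf_ne c m hmlt
      have hpm : (line2 ++ List.replicate (c.length - m) (none : Option Int)).getD m none
          = none := by
        rw [List.getD_append_right _ _ _ m (le_refl m), Nat.sub_self]
        exact getD_replicate_none _ 0
      have hne : c ≠ line2 ++ List.replicate (c.length - m) (none : Option Int) := by
        intro hEq
        rw [hEq] at hcm
        exact hcm hpm
      show (c != _) = _
      rw [bne_iff_ne.mpr hne, hpair, hp, Bool.or_true]
    · have hp' : hasAdj (compOf c) = false := Bool.eq_false_iff.mpr hp
      have hnog : ∀ k, 1 ≤ k →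
          ((compOf c).getD k none == (compOf c).getD (k-1) none
            && (compOf c).getD k none != none) = false := by
        intro k hk
        apply Bool.eq_false_iff.mpr
        intro hq
        rcases Nat.lt_or_ge k (compOf c).length with hlt | hge
        · exact hp ((hasAdj_iff_idx (compOf c)).mpr ⟨k, hk, hlt, hq⟩)
        · rw [List.getD_eq_default _ _ hge] at hq
          simp at hq
      have hid := mergeShift_id ((compOf c).length - 1) (compOf c) hnog
      show (c != _) = _
      rw [hid, hcc]
      conv_lhs => rw [← hshape]
      rw [bne_self_eq_false, hpair, hp', hg', Bool.or_false]

theorem colOf_length (field : List (List (Option Int))) (i : Nat) :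
    (colOf field i).length = field.length := by simp [colOf]

theorem colA_changed_filter (n : Nat) (c : List (Option Int)) :
    (c != (mergeShift (c.filter (fun el => el != none))
        ((c.filter (fun el => el != none)).length - 1)).filter (fun el => el != none) ++
      List.replicate (n - ((mergeShift (c.filter (fun el => el != none))
        ((c.filter (fun el => el != none)).length - 1)).filter (fun el => el != none)).length)
      (none : Option Int)) = colA_changed n c := rfl

theorem up_dir_eq (field : List (List (Option Int))) (hpre : Pre_up_dir field) :
    up_dir field = (List.range field.length).foldl
      (fun b i => b || (gapVal (colOf field i) || pairAux (colOf field i) none)) false := by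
  cases field with
  | nil => rfl
  | cons r rows =>
    unfold up_dir
    apply PySem.List.foldl_congr_mem
    intro acc i _
    have hr : r.length = (r :: rows).length := hpre r List.mem_cons_self
    simp only [PySem.List.foldl_append_singleton_eq_map, List.nil_append, List.headD_cons]
    rw [show (List.range (r :: rows).length).map
        (fun j => (((r :: rows).getD j []).getD i none)) = colOf (r :: rows) i from rfl]
    rw [show r.length = (colOf (r :: rows) i).length from by rw [colOf_length]; exact hr]
    rw [colA_changed_filter]
    rw [colA_char]
    cases (gapVal (colOf (r :: rows) i) || pairAux (colOf (r :: rows) i) none) <;>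
      cases acc <;> rfl

theorem up_dir_alt_eq (field : List (List (Option Int))) :
    up_dir_alt field = (List.range field.length).foldl
      (fun b i => b || (gapVal (colOf field i) || pairAux (colOf field i) none)) false := by
  unfold up_dir_alt
  apply PySem.List.foldl_congr_mem
  intro acc i _
  have h1 : (List.range field.length).foldl
      (fun st j => stepB st ((field.getD j []).getD i none)) (acc, false, (none : Option Int))
      = (List.range field.length).foldl
      (fun st j => stepB st ((colOf field i).getD j none)) (acc, false, (none : Option Int)) := by
    apply PySem.List.foldl_congr_mem
    intro st j hj
    rw [colOf, PySem.List.getD_map_range _ _ _ _ (List.mem_range.mp hj)]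
  rw [h1]
  rw [show field.length = (colOf field i).length from (colOf_length field i).symm]
  rw [foldl_getD_range (colOf field i) stepB (acc, false, (none : Option Int)) none]
  rw [scan_state, scanPure_char]
  rfl

-- ===== VERDICT (by name: the statement is the Claim_ definition above) =====
theorem up_dir_spec : Claim_equal_up_dir := by
  intro field _ hpre
  unfold Spec_up_dir
  rw [up_dir_eq field hpre, up_dir_alt_eq field]
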